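-- pv_equiv track=rewrite | github.com/vickyjkwan/sqlanalyzer | sqlanalyzer/new_bundle.py | get_sub_dict
-- ===== SOURCE A (Python) =====
-- def landmark(line):
--     for syntax in ['FROM', 'LEFT JOIN', 'INNER JOIN', 'OUTER JOIN', 'RIGHT JOIN', 'CROSS JOIN', 'FULL JOIN', 'FULL OUTER JOIN']:
--         if line.startswith(syntax):
--             return True
--
-- def divide(copy_query_list):
--     sub_join = []
--     for i, line in enumerate(copy_query_list):
--
--         if landmark(line):
--             sub_join.append(line)
--             del copy_query_list[:i+1]
--             join_query = next((s for s in copy_query_list if not s.startswith(' ')), 'end of query')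
--             try:
--                 join_pos = copy_query_list.index(join_query)
--                 sub_join.extend(copy_query_list[:join_pos])
--                 del copy_query_list[:join_pos]
--                 break
--             except:
--                 sub_join.extend(copy_query_list)
--                 del copy_query_list[:]
--                 break
--
--     return sub_join, copy_query_list
--
-- def get_sub_dict(copy_query_list):
--     i = 0
--     join_dict = {}
--     new_copy_query_list = copy_query_list
--     sub_join = [1]
--     while sub_join != []:
--         i += 1
--         sub_join, new_copy_query_list = divide(new_copy_query_list)
--         if sub_join != []:
--             join_dict['join_{}'.format(i)] = '\n'.join(sub_join)
--
--     return join_dict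
-- ===== SOURCE B (Python) =====
-- # B: single forward pass with an index pointer; no del/index rescans.
-- # Note: A mutates its argument in place (del through an alias); B does not —
-- # the equivalence claimed is about the return value only.
-- _PREFIXES = ('FROM', 'LEFT JOIN', 'INNER JOIN', 'OUTER JOIN', 'RIGHT JOIN',
--              'CROSS JOIN', 'FULL JOIN', 'FULL OUTER JOIN')
--
-- def get_sub_dict(copy_query_list):
--     join_dict = {}
--     n = len(copy_query_list)
--     i = 0
--     k = 0
--     while i < n:
--         line = copy_query_list[i]
--         if line.startswith(_PREFIXES):
--             block = [line]
--             i += 1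
--             while i < n and copy_query_list[i].startswith(' '):
--                 block.append(copy_query_list[i])
--                 i += 1
--             k += 1
--             join_dict['join_{}'.format(k)] = '\n'.join(block)
--         else:
--             i += 1
--     return join_dict
-- ===== Notes on version B (the rewrite author's own statement) =====
-- stated objective: faster
-- what changed: Replaced the restart-per-block loop (which re-enumerates, del-slices the list and calls next/index on every block) with one forward pass over an index pointer that collects each landmark line plus its indented continuation lines directly.
import Mathlib
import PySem

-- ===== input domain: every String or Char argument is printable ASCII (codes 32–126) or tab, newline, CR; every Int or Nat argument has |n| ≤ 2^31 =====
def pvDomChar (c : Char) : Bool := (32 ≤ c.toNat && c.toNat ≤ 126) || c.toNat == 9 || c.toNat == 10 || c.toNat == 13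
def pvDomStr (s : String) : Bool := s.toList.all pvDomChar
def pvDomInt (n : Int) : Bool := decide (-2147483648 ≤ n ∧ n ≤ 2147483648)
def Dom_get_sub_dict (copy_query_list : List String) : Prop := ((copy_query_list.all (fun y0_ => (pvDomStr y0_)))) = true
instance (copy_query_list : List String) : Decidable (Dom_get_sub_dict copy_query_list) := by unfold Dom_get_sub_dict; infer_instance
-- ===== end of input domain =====

-- B replaces A's restart-per-block scans (del/next/index) by one forward pass; A mutates its
-- argument in place (del through an alias) and B does not — the claim is about the return value.

-- ===== PORT A =====
def landmarkSyntaxes : List String :=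
  ["FROM", "LEFT JOIN", "INNER JOIN", "OUTER JOIN", "RIGHT JOIN", "CROSS JOIN", "FULL JOIN", "FULL OUTER JOIN"]

def landmark (line : String) : Bool :=
  landmarkSyntaxes.any (fun syn => PySem.Str.startswith line syn)

-- the for-loop of `divide`: `full` is the current list, `rest` the part still to enumerate, `i` the index
def divideGo (full : List String) (rest : List String) (i : Nat) : List String × List String :=
  match rest with
  | [] => ([], full)
  | line :: rs =>
    if landmark line then
      let after := full.drop (i+1)                          -- del copy_query_list[:i+1]
      let join_query := (after.find? (fun s => !(PySem.Str.startswith s " "))).getD "end of query"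
      match PySem.List.index? after join_query with
      | some join_pos => (line :: after.take join_pos, after.drop join_pos)
      | none => (line :: after, [])                         -- except: ValueError
    else divideGo full rs (i+1)

def divide (copy_query_list : List String) : List String × List String :=
  divideGo copy_query_list copy_query_list 0

-- termination fact the port's while-loop cites: a nonempty sub_join strictly shrinks the list
theorem divideGo_snd_lt : ∀ (rest full : List String) (i : Nat), full.length = rest.length + i →
    (divideGo full rest i).1 ≠ [] → (divideGo full rest i).2.length < full.length := by
  intro rest
  induction rest with
  | nil => intro full i _ h; simp [divideGo] at h
  | cons line rs ih =>
    intro full i hlen h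
    simp only [List.length_cons] at hlen
    by_cases hl : landmark line = true
    · simp only [divideGo, hl, if_pos] at h ⊢
      cases hidx : PySem.List.index? (full.drop (i+1))
          (((full.drop (i+1)).find? (fun s => !(PySem.Str.startswith s " "))).getD "end of query") with
      | some p => simp only [List.length_drop]; omega
      | none => simp only [List.length_nil]; omega
    · simp only [divideGo, hl, if_neg, Bool.false_eq_true, not_false_iff] at h ⊢
      exact ih full (i+1) (by omega) h

theorem divide_snd_lt (l : List String) (h : (divide l).1 ≠ []) : (divide l).2.length < l.length :=
  divideGo_snd_lt l l 0 (by omega) h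

def getSubLoop (l : List String) (i : Nat) (acc : PySem.Dict String String) : PySem.Dict String String :=
  if h : (divide l).1 = [] then acc
  else getSubLoop (divide l).2 (i+1)
        (acc.insert ("join_" ++ PySem.Int.toStr ((i : Int) + 1)) (PySem.Str.join "\n" (divide l).1))
termination_by l.length
decreasing_by exact divide_snd_lt l h

def get_sub_dict (copy_query_list : List String) : List (String × String) :=
  (getSubLoop copy_query_list 0 PySem.Dict.empty).items

-- ===== PORT B =====
def bPrefixes : List String :=
  ["FROM", "LEFT JOIN", "INNER JOIN", "OUTER JOIN", "RIGHT JOIN", "CROSS JOIN", "FULL JOIN", "FULL OUTER JOIN"]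

def bStarts (line : String) : Bool :=
  bPrefixes.any (fun p => PySem.Str.startswith line p)

-- the inner while: collect the indented continuation lines, return (block-tail, rest)
def takeIndented : List String → List String × List String
  | [] => ([], [])
  | s :: rs =>
    if PySem.Str.startswith s " " then
      (s :: (takeIndented rs).1, (takeIndented rs).2)
    else ([], s :: rs)

theorem takeIndented_snd_le : ∀ (l : List String), (takeIndented l).2.length ≤ l.length := by
  intro l
  induction l with
  | nil => simp [takeIndented]
  | cons s rs ih =>
    by_cases hs : PySem.Str.startswith s " " = true
    · rw [takeIndented, if_pos hs]
      show (takeIndented rs).2.length ≤ (s :: rs).length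
      simp only [List.length_cons]; omega
    · rw [takeIndented, if_neg hs]

def altGo (l : List String) (k : Nat) (acc : PySem.Dict String String) : PySem.Dict String String :=
  match l with
  | [] => acc
  | line :: rs =>
    if bStarts line then
      altGo (takeIndented rs).2 (k+1)
        (acc.insert ("join_" ++ PySem.Int.toStr ((k : Int) + 1))
          (PySem.Str.join "\n" (line :: (takeIndented rs).1)))
    else altGo rs k acc
termination_by l.length
decreasing_by
  · have := takeIndented_snd_le rs; simp; omega
  · simp

def get_sub_dict_alt (copy_query_list : List String) : List (String × String) :=
  (altGo copy_query_list 0 PySem.Dict.empty).items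

-- ===== PRECONDITION & SPEC =====
def Spec_get_sub_dict (copy_query_list : List String) (out : List (String × String)) : Prop := out = get_sub_dict_alt copy_query_list
instance (copy_query_list : List String) (out : List (String × String)) : Decidable (Spec_get_sub_dict copy_query_list out) := by unfold Spec_get_sub_dict; infer_instance

-- ===== CLAIM (what is proved, stated in full; the proofs are below) =====
def Claim_equal_get_sub_dict : Prop := ∀ (copy_query_list : List String), Dom_get_sub_dict copy_query_list → Spec_get_sub_dict copy_query_list (get_sub_dict copy_query_list)

-- ===== LEMMAS AND PROOFS =====

theorem bStarts_eq_landmark (line : String) : bStarts line = landmark line := rfl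

-- A's next/index/slice dance on the tail computes exactly B's span into indented block and rest
theorem index_span : ∀ (rs : List String),
    (match PySem.List.index? rs ((rs.find? (fun s => !(PySem.Str.startswith s " "))).getD "end of query") with
     | some p => (rs.take p, rs.drop p)
     | none => (rs, [])) = takeIndented rs := by
  intro rs
  induction rs with
  | nil => simp [takeIndented, PySem.List.index?]
  | cons s t ih =>
    by_cases hs : PySem.Str.startswith s " " = true
    · have hfind : (s :: t).find? (fun s => !(PySem.Str.startswith s " ")) =
          t.find? (fun s => !(PySem.Str.startswith s " ")) :=
        List.find?_cons_of_neg (by simpa using hs)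
      rw [hfind]
      have hjqns : PySem.Str.startswith
          ((t.find? (fun s => !(PySem.Str.startswith s " "))).getD "end of query") " " = false := by
        cases hf : t.find? (fun s => !(PySem.Str.startswith s " ")) with
        | none => simp only [Option.getD_none]; decide
        | some x =>
          have := List.find?_some hf
          simp only [Option.getD_some]
          simpa using this
      have hne : s ≠ (t.find? (fun s => !(PySem.Str.startswith s " "))).getD "end of query" := by
        intro h
        rw [← h] at hjqns
        rw [hjqns] at hs
        exact absurd hs (by simp)
      rw [PySem.List.index?_cons_of_ne t hne]
      cases hidx : PySem.List.index? t
          ((t.find? (fun s => !(PySem.Str.startswith s " "))).getD "end of query") with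
      | some p =>
        rw [hidx] at ih
        simp only [Option.map_some]
        rw [takeIndented, if_pos hs, ← ih]
        simp only [List.take_succ_cons, List.drop_succ_cons]
      | none =>
        rw [hidx] at ih
        simp only [Option.map_none]
        rw [takeIndented, if_pos hs, ← ih]
    · have hfind : (s :: t).find? (fun s => !(PySem.Str.startswith s " ")) = some s :=
        List.find?_cons_of_pos (by simp [Bool.not_eq_true] at hs ⊢; exact hs)
      rw [hfind]
      simp only [Option.getD_some, PySem.List.index?_cons_self]
      rw [takeIndented, if_neg hs]
      simp

theorem divide_landmark (line : String) (rs : List String) (h : landmark line = true) :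
    divide (line :: rs) = (line :: (takeIndented rs).1, (takeIndented rs).2) := by
  have := index_span rs
  simp only [divide, divideGo, h, if_pos, List.drop_succ_cons, List.drop_zero]
  cases hidx : PySem.List.index? rs ((rs.find? (fun s => !(PySem.Str.startswith s " "))).getD "end of query") with
  | some p => rw [hidx] at this; simp only [← this]
  | none => rw [hidx] at this; simp only [← this]

-- shifting the retained full list by one cons does not change sub_join, nor (when nonempty) the rest
theorem divideGo_shift : ∀ (rest : List String) (x : String) (full : List String) (i : Nat),
    (divideGo (x :: full) rest (i+1)).1 = (divideGo full rest i).1 ∧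
    ((divideGo full rest i).1 ≠ [] → (divideGo (x :: full) rest (i+1)).2 = (divideGo full rest i).2) := by
  intro rest
  induction rest with
  | nil => intro x full i; constructor <;> simp [divideGo]
  | cons line rs ih =>
    intro x full i
    by_cases hl : landmark line = true
    · have hdrop : (x :: full).drop (i+1+1) = full.drop (i+1) := by rfl
      constructor
      · simp only [divideGo, hl, if_pos, hdrop]
      · intro _; simp only [divideGo, hl, if_pos, hdrop]
    · simp only [divideGo, hl, if_neg, Bool.false_eq_true, not_false_iff]
      exact ih x full (i+1)

theorem divide_not_landmark_fst (line : String) (rs : List String) (h : ¬ landmark line = true) :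
    (divide (line :: rs)).1 = (divide rs).1 := by
  simp only [divide, divideGo, h]
  exact (divideGo_shift rs line rs 0).1

theorem divide_not_landmark_snd (line : String) (rs : List String) (h : ¬ landmark line = true)
    (hne : (divide rs).1 ≠ []) : (divide (line :: rs)).2 = (divide rs).2 := by
  simp only [divide, divideGo, h]
  exact (divideGo_shift rs line rs 0).2 hne

theorem getSubLoop_eq_altGo : ∀ (n : Nat) (l : List String) (i : Nat) (acc : PySem.Dict String String),
    l.length ≤ n → getSubLoop l i acc = altGo l i acc := by
  intro n
  induction n with
  | zero =>
    intro l i acc hlen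
    have hl : l = [] := by cases l <;> simp_all
    subst hl
    rw [getSubLoop, altGo]
    simp [divide, divideGo]
  | succ m ih =>
    intro l i acc hlen
    cases l with
    | nil => rw [getSubLoop, altGo]; simp [divide, divideGo]
    | cons line rs =>
      simp only [List.length_cons] at hlen
      have hm : rs.length ≤ m := by omega
      by_cases hl : landmark line = true
      · have hdiv := divide_landmark line rs hl
        have hne1 : ¬((divide (line :: rs)).1 = []) := by rw [hdiv]; simp
        rw [getSubLoop, dif_neg hne1, altGo,
          if_pos (show bStarts line = true by rw [bStarts_eq_landmark]; exact hl), hdiv]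
        exact ih (takeIndented rs).2 (i+1) _ (le_trans (takeIndented_snd_le rs) hm)
      · have hfst := divide_not_landmark_fst line rs hl
        rw [altGo, if_neg (by rw [bStarts_eq_landmark]; exact hl), ← ih rs i acc hm]
        by_cases hne : (divide rs).1 = []
        · rw [getSubLoop, dif_pos (by rw [hfst]; exact hne)]
          rw [getSubLoop, dif_pos hne]
        · rw [getSubLoop, dif_neg (by rw [hfst]; exact hne)]
          rw [hfst, divide_not_landmark_snd line rs hl hne]
          conv_rhs => rw [getSubLoop]
          rw [dif_neg hne]

-- ===== VERDICT (by name: the statement is the Claim_ definition above) =====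
theorem get_sub_dict_spec : Claim_equal_get_sub_dict := by
  intro l _
  unfold Spec_get_sub_dict get_sub_dict get_sub_dict_alt
  rw [getSubLoop_eq_altGo l.length l 0 PySem.Dict.empty (le_refl _)]
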